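-- pv_equiv track=rewrite | github.com/WikidPad/WikidPad | WikidPad/lib/pwiki/StringOps.py | urlQuoteSpecific
-- ===== SOURCE A (Python) =====
-- def urlQuoteSpecific(s, toQuote=''):
--     """
--     Only quote characters in toQuote
--     """
--     result = []
--
--     for c in s:
--         if c in toQuote:
--             result.append("%%%02X" % ord(c))
--         else:
--             result.append(c)
--
--     return "".join(result)
-- ===== SOURCE B (Python) =====
-- def urlQuoteSpecific(s, toQuote=''):
--     """
--     Only quote characters in toQuote
--     """
--     chars = list(dict.fromkeys(toQuote))
--
--     def go(seg, i):
--         if i == len(chars):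
--             return seg
--         c = chars[i]
--         quoted = "%%%02X" % ord(c)
--         return quoted.join(go(part, i + 1) for part in seg.split(c))
--     return go(s, 0)
-- ===== Notes on version B (the rewrite author's own statement) =====
-- stated objective: alternative
-- what changed: Instead of A's single per-character loop with a membership test, B recurses over the distinct quote characters: it splits the string on the current quote character, processes each segment recursively with the remaining quote characters, and rejoins the segments with that character's percent escape.
import Mathlib
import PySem

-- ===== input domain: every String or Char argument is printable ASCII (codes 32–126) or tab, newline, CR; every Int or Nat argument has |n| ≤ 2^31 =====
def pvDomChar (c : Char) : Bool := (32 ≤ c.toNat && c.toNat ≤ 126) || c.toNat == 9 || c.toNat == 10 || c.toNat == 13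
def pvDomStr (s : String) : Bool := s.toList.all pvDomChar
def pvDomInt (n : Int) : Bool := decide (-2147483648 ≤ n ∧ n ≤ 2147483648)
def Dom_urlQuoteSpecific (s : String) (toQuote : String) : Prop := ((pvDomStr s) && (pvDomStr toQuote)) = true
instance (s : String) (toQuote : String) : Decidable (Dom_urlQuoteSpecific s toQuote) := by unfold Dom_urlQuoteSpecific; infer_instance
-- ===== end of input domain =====

-- B replaces A's per-character loop with a recursion over toQuote: split s on each
-- quote character and rejoin the recursively processed segments with the escape
-- (alternative decomposition; same asymptotic cost).


-- shared helper: "%%%02X" % ord(c) — '%' followed by two uppercase hex digits of the code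
def pvHexDigit (n : Nat) : Char := if n < 10 then Char.ofNat (48 + n) else Char.ofNat (55 + n)
def pvQuoteChar (c : Char) : List Char := ['%', pvHexDigit (c.toNat / 16), pvHexDigit (c.toNat % 16)]

-- ===== PORT A =====
-- loop over s, appending either the quoted form or the character; "".join at the end
-- (c in toQuote for a single character c is character membership)
def urlQuoteSpecific (s : String) (toQuote : String) : String :=
  let result : List (List Char) :=
    s.toList.foldl (fun acc c =>
      if c ∈ toQuote.toList then acc ++ [pvQuoteChar c] else acc ++ [[c]]) []
  String.ofList result.flatten

-- ===== PORT B =====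
-- seg.split(c) of Python (single-character separator), on lists of characters
def pvSplitChar (c : Char) : List Char → List (List Char)
  | [] => [[]]
  | a :: rest =>
    match pvSplitChar c rest with
    | [] => [[]]   -- unreachable: pvSplitChar never returns []
    | s :: ss => if a = c then [] :: s :: ss else (a :: s) :: ss

-- q.join(parts) of Python
def pvJoin (q : List Char) : List (List Char) → List Char
  | [] => []
  | [x] => x
  | x :: y :: xs => x ++ q ++ pvJoin q (y :: xs)

-- go(seg, i): split on the next distinct quote character, recurse on each segment, rejoin
def pvGo : List Char → List Char → List Char
  | seg, [] => seg
  | seg, c :: rest => pvJoin (pvQuoteChar c) ((pvSplitChar c seg).map (fun p => pvGo p rest))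
termination_by _ chars => chars.length

-- chars = list(dict.fromkeys(toQuote)) is PySem.List.dedup (first occurrences, in order)
def urlQuoteSpecific_alt (s : String) (toQuote : String) : String :=
  String.ofList (pvGo s.toList (PySem.List.dedup toQuote.toList))

-- ===== PRECONDITION & SPEC =====
def Spec_urlQuoteSpecific (s : String) (toQuote : String) (out : String) : Prop := out = urlQuoteSpecific_alt s toQuote
instance (s : String) (toQuote : String) (out : String) : Decidable (Spec_urlQuoteSpecific s toQuote out) := by unfold Spec_urlQuoteSpecific; infer_instance

-- ===== CLAIM (what is proved, stated in full; the proofs are below) =====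
def Claim_equal_urlQuoteSpecific : Prop := ∀ (s : String) (toQuote : String), Dom_urlQuoteSpecific s toQuote → Spec_urlQuoteSpecific s toQuote (urlQuoteSpecific s toQuote)

-- ===== LEMMAS AND PROOFS =====

theorem pvSplitChar_ne_nil (c : Char) (l : List Char) : pvSplitChar c l ≠ [] := by
  cases l with
  | nil => simp [pvSplitChar]
  | cons a rest =>
    simp only [pvSplitChar]
    cases pvSplitChar c rest with
    | nil => simp
    | cons s ss => by_cases h : a = c <;> simp [h]

theorem pvJoin_nil_cons (q y : List Char) (ys : List (List Char)) :
    pvJoin q (([] : List Char) :: y :: ys) = q ++ pvJoin q (y :: ys) := by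
  simp [pvJoin]

theorem pvJoin_append_head (q x y : List Char) (ys : List (List Char)) :
    pvJoin q ((x ++ y) :: ys) = x ++ pvJoin q (y :: ys) := by
  cases ys <;> simp [pvJoin]

-- the key invariant: pvGo seg chars quotes exactly the characters of seg occurring in chars
theorem pvGo_eq (rest : List Char) : ∀ seg : List Char,
    pvGo seg rest = seg.flatMap (fun c => if c ∈ rest then pvQuoteChar c else [c]) := by
  induction rest with
  | nil => intro seg; simp [pvGo]
  | cons c0 rest' ih =>
    have inner : ∀ seg : List Char,
        pvJoin (pvQuoteChar c0)
          ((pvSplitChar c0 seg).map (fun p => p.flatMap (fun c => if c ∈ rest' then pvQuoteChar c else [c])))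
        = seg.flatMap (fun c => if c ∈ c0 :: rest' then pvQuoteChar c else [c]) := by
      intro seg
      induction seg with
      | nil => simp [pvSplitChar, pvJoin]
      | cons a seg' ih2 =>
        obtain ⟨s, ss, hsplit⟩ : ∃ s ss, pvSplitChar c0 seg' = s :: ss := by
          cases h : pvSplitChar c0 seg' with
          | nil => exact absurd h (pvSplitChar_ne_nil c0 seg')
          | cons s ss => exact ⟨s, ss, rfl⟩
        rw [hsplit] at ih2
        simp only [List.map_cons] at ih2
        by_cases ha : a = c0
        · subst ha
          simp only [pvSplitChar, hsplit]
          rw [if_true]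
          simp only [List.map_cons, List.flatMap_nil]
          rw [pvJoin_nil_cons, ih2]
          simp [List.flatMap_cons]
        · simp only [pvSplitChar, hsplit]
          rw [if_neg ha]
          simp only [List.map_cons, List.flatMap_cons]
          rw [pvJoin_append_head, ih2]
          simp [List.mem_cons, ha]
    intro seg
    simp only [pvGo]
    calc pvJoin (pvQuoteChar c0) ((pvSplitChar c0 seg).map (fun p => pvGo p rest'))
        = pvJoin (pvQuoteChar c0) ((pvSplitChar c0 seg).map
            (fun p => p.flatMap (fun c => if c ∈ rest' then pvQuoteChar c else [c]))) := by
          congr 1; exact List.map_congr_left (fun p _ => ih p)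
      _ = seg.flatMap (fun c => if c ∈ c0 :: rest' then pvQuoteChar c else [c]) := inner seg

theorem urlQuoteSpecific_spec' (s toQuote : String) :
    urlQuoteSpecific s toQuote = urlQuoteSpecific_alt s toQuote := by
  unfold urlQuoteSpecific urlQuoteSpecific_alt
  have hA : ∀ (init : List (List Char)) (cs : List Char),
      cs.foldl (fun acc c =>
        if c ∈ toQuote.toList then acc ++ [pvQuoteChar c] else acc ++ [[c]]) init
      = init ++ cs.map (fun c => if c ∈ toQuote.toList then pvQuoteChar c else [c]) := by
    intro init cs
    induction cs generalizing init with
    | nil => simp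
    | cons c cs ih => by_cases h : c ∈ toQuote.toList <;> simp [h, ih]
  rw [hA, List.nil_append, pvGo_eq]
  simp [List.flatMap_def]

-- ===== VERDICT (by name: the statement is the Claim_ definition above) =====
theorem urlQuoteSpecific_spec : Claim_equal_urlQuoteSpecific := by
  intro s toQuote _
  exact urlQuoteSpecific_spec' s toQuote
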